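-- pv_equiv track=rewrite | github.com/hd0126/paper-to-md | engines/docling_convert.py | _move_figures_to_para_end
-- ===== SOURCE A (Python) =====
-- def _move_figures_to_para_end(items: list) -> list:
--     """연속된 그림 블록이 문장 중간에 있으면 이어지는 본문을 먼저 배치.
--
--     연속 그림(Figure1 + Figure2 등)도 하나의 블록으로 묶어서 판단.
--     앞·뒤가 모두 text인 경우에만 이동 (섹션 경계나 끝부분은 이동 안 함).
--     """
--     result = []
--     i = 0
--     while i < len(items):
--         it = items[i]
--         if it["type"] == "img":
--             # ① 연속된 img(+caption_inline) 그룹 전체를 수집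
--             fig_block: list = []
--             while i < len(items) and items[i]["type"] in ("img", "caption_inline"):
--                 if items[i]["type"] == "img":
--                     grp = [items[i]]
--                     i += 1
--                     while i < len(items) and items[i]["type"] == "caption_inline":
--                         grp.append(items[i])
--                         i += 1
--                     fig_block.append(grp)
--                 else:
--                     # 고아 caption_inline (정상적으로는 발생하지 않음)
--                     fig_block.append([items[i]])
--                     i += 1
--
--             # ② 단락 컨텍스트 판정:
--             #   - result를 뒤에서 탐색, img/caption_inline을 건너뛰어 text 찾기
--             #   - 이로써 연속 figure 사이에서도 "단락 중간"임을 인식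
--             prev_is_text = False
--             for _k in range(len(result) - 1, -1, -1):
--                 _t = result[_k]["type"]
--                 if _t in ("img", "caption_inline"):
--                     continue   # 앞의 figure 그룹을 건너뜀
--                 prev_is_text = (_t == "text")
--                 break
--
--             next_is_text = i < len(items) and items[i]["type"] == "text"
--             if prev_is_text and next_is_text:
--                 while i < len(items) and items[i]["type"] == "text":
--                     result.append(items[i])
--                     i += 1
--
--             # ③ 그림 블록 추가
--             for grp in fig_block:
--                 result.extend(grp)
--         else:
--             result.append(it)
--             i += 1
--     return result
-- ===== SOURCE B (Python) =====
-- def _move_figures_to_para_end(items: list) -> list: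
--     """Segment-based rewrite: pass 1 groups items into segments (figure runs
--     starting at an img, text runs, and singletons); pass 2 walks the segments,
--     moving the following text run before a figure run when the nearest
--     preceding non-caption segment is text."""
--     FIG = ("img", "caption_inline")
--     segs = []
--     i = 0
--     n = len(items)
--     while i < n:
--         t = items[i]["type"]
--         if t == "img":
--             j = i
--             while j < n and items[j]["type"] in FIG:
--                 j += 1
--             segs.append(("fig", items[i:j]))
--             i = j
--         elif t == "text":
--             j = i
--             while j < n and items[j]["type"] == "text":
--                 j += 1
--             segs.append(("text", items[i:j]))
--             i = j
--         elif t == "caption_inline":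
--             segs.append(("cap", [items[i]]))
--             i += 1
--         else:
--             segs.append(("other", [items[i]]))
--             i += 1
--
--     out = []
--     k = 0
--     m = len(segs)
--     while k < m:
--         kind, seg = segs[k]
--         if kind == "fig":
--             prev_is_text = False
--             for p in range(k - 1, -1, -1):
--                 if segs[p][0] == "cap":
--                     continue
--                 prev_is_text = segs[p][0] == "text"
--                 break
--             if prev_is_text and k + 1 < m and segs[k + 1][0] == "text":
--                 out.extend(segs[k + 1][1])
--                 out.extend(seg)
--                 k += 2
--                 continue
--         out.extend(seg)
--         k += 1
--     return out
-- ===== Notes on version B (the rewrite author's own statement) =====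
-- stated objective: alternative
-- what changed: Replaces A's single online loop, which repeatedly rescans the growing result list backwards to decide paragraph context, with a two-pass decomposition: pass 1 segments the items into figure runs, text runs and singletons; pass 2 walks the segment list and swaps a figure run with the following text run when the nearest preceding non-caption segment is text.
-- outside the precondition, e.g. on _move_figures_to_para_end([{'kind': 'img'}]): A raises KeyError, B raises KeyError
import Mathlib
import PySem

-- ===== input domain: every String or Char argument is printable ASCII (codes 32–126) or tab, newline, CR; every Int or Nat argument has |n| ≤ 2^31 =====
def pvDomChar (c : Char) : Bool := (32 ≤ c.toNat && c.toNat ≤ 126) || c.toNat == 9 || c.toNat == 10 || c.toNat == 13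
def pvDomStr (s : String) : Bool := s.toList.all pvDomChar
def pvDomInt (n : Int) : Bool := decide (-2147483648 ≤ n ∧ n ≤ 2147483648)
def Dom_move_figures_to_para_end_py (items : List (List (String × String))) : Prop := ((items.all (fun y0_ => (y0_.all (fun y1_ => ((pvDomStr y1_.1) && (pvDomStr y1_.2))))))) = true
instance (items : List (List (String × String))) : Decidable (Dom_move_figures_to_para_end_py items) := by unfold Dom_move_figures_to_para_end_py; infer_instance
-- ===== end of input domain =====

-- B replaces A's online loop (which rescans the growing result backwards at every
-- figure block) by a two-pass decomposition: first segment the items into figure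
-- runs / text runs / singletons, then walk the segment list, swapping a figure run
-- with the following text run when the paragraph context allows (objective: alternative).

-- ===== PORT A =====
-- type of one item (a dict); items without a "type" key are excluded by Pre_ (Python raises KeyError)
def pvTy (it : List (String × String)) : String := PySem.Dict.getD (PySem.Dict.mk it) "type" ""

def pvIsFig (t : String) : Bool := t == "img" || t == "caption_inline"

-- inner while of A collecting the fig_block (list of groups) and returning the remaining items
def pvCollectFig : List (List (String × String)) →
    (List (List (List (String × String))) × List (List (String × String)))
  | [] => ([], [])
  | x :: xs =>
    if pvIsFig (pvTy x) then
      if pvTy x == "img" then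
        let r := pvCollectFig (xs.dropWhile (fun y => pvTy y == "caption_inline"))
        ((x :: xs.takeWhile (fun y => pvTy y == "caption_inline")) :: r.1, r.2)
      else
        let r := pvCollectFig xs
        ([x] :: r.1, r.2)
    else ([], x :: xs)
termination_by l => l.length
decreasing_by
  · have := List.length_dropWhile_le (fun y => pvTy y == "caption_inline") xs
    simp; omega
  · simp

-- needed by pvGoA's termination proof
theorem pvCollectFig_len : ∀ (l : List (List (String × String))),
    (pvCollectFig l).2.length ≤ l.length := by
  intro l
  induction l using pvCollectFig.induct with
  | case1 => simp [pvCollectFig]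
  | case2 x xs h1 h2 ih =>
    have := List.length_dropWhile_le (fun y => pvTy y == "caption_inline") xs
    simp only [pvCollectFig, h1, h2, if_true]
    simp; omega
  | case3 x xs h1 h2 ih =>
    simp only [pvCollectFig, h1, h2, if_true, if_false]
    simp; omega
  | case4 x xs h1 =>
    simp [pvCollectFig, h1]

-- A's backward scan over result (indices len-1..0 with break), as recursion on the reverse
def pvPrevAux : List (List (String × String)) → Bool
  | [] => false
  | x :: xs => if pvIsFig (pvTy x) then pvPrevAux xs else pvTy x == "text"

-- A's outer while loop: result accumulator + remaining items
def pvGoA (result : List (List (String × String))) :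
    List (List (String × String)) → List (List (String × String))
  | [] => result
  | it :: xs =>
    if h : (pvTy it == "img") = true then
      let c := pvCollectFig (it :: xs)
      if pvPrevAux result.reverse &&
          (match c.2 with | y :: _ => pvTy y == "text" | [] => false) then
        pvGoA (result ++ c.2.takeWhile (fun y => pvTy y == "text") ++ c.1.flatten)
              (c.2.dropWhile (fun y => pvTy y == "text"))
      else pvGoA (result ++ c.1.flatten) c.2
    else pvGoA (result ++ [it]) xs
termination_by l => l.length
decreasing_by
  · have h1 : (pvCollectFig (it :: xs)).2.length ≤ xs.length := by
      simp only [pvCollectFig, pvIsFig, h]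
      simp only [Bool.true_or, if_true]
      have := pvCollectFig_len (xs.dropWhile (fun y => pvTy y == "caption_inline"))
      have := List.length_dropWhile_le (fun y => pvTy y == "caption_inline") xs
      simp; omega
    have h2 := List.length_dropWhile_le (fun y => pvTy y == "text") (pvCollectFig (it :: xs)).2
    simp; omega
  · have h1 : (pvCollectFig (it :: xs)).2.length ≤ xs.length := by
      simp only [pvCollectFig, pvIsFig, h]
      simp only [Bool.true_or, if_true]
      have := pvCollectFig_len (xs.dropWhile (fun y => pvTy y == "caption_inline"))
      have := List.length_dropWhile_le (fun y => pvTy y == "caption_inline") xs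
      simp; omega
    simp; omega
  · simp

def move_figures_to_para_end_py (items : List (List (String × String))) :
    List (List (String × String)) := pvGoA [] items

-- ===== PORT B =====
-- pass 1 of B: segment items into ("fig", run) / ("text", run) / ("cap",[x]) / ("other",[x])
def pvSegs : List (List (String × String)) → List (String × List (List (String × String)))
  | [] => []
  | x :: xs =>
    if pvTy x == "img" then
      ("fig", x :: xs.takeWhile (fun y => pvIsFig (pvTy y))) ::
        pvSegs (xs.dropWhile (fun y => pvIsFig (pvTy y)))
    else if pvTy x == "text" then
      ("text", x :: xs.takeWhile (fun y => pvTy y == "text")) ::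
        pvSegs (xs.dropWhile (fun y => pvTy y == "text"))
    else if pvTy x == "caption_inline" then ("cap", [x]) :: pvSegs xs
    else ("other", [x]) :: pvSegs xs
termination_by l => l.length
decreasing_by
  · have := List.length_dropWhile_le (fun y => pvIsFig (pvTy y)) xs
    simp; omega
  · have := List.length_dropWhile_le (fun y => pvTy y == "text") xs
    simp; omega
  · simp
  · simp

-- B's backward scan over the already-walked segments (held in reverse)
def pvPrevScan : List (String × List (List (String × String))) → Bool
  | [] => false
  | s :: ps => if s.1 == "fig" || s.1 == "cap" then pvPrevScan ps else s.1 == "text"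

-- pass 2 of B: walk the segments; prevRev = segments already passed, most recent first
def pvWalk (prevRev : List (String × List (List (String × String)))) :
    List (String × List (List (String × String))) → List (List (String × String))
  | [] => []
  | s :: rest =>
    if s.1 == "fig" && pvPrevScan prevRev then
      match rest with
      | s2 :: rest2 =>
        if s2.1 == "text" then s2.2 ++ s.2 ++ pvWalk (s2 :: s :: prevRev) rest2
        else s.2 ++ pvWalk (s :: prevRev) (s2 :: rest2)
      | [] => s.2 ++ pvWalk (s :: prevRev) []
    else s.2 ++ pvWalk (s :: prevRev) rest
termination_by l => l.length
decreasing_by all_goals simp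

def move_figures_to_para_end_py_alt (items : List (List (String × String))) :
    List (List (String × String)) := pvWalk [] (pvSegs items)

-- ===== PRECONDITION & SPEC =====
-- Pre_ excludes items lacking a "type" key, on which the Python A raises KeyError.
def Pre_move_figures_to_para_end_py (items : List (List (String × String))) : Prop :=
  ∀ it ∈ items, (PySem.Dict.get? (PySem.Dict.mk it) "type").isSome = true
instance (items : List (List (String × String))) :
    Decidable (Pre_move_figures_to_para_end_py items) := by
  unfold Pre_move_figures_to_para_end_py; infer_instance

def pvWitness_move_figures_to_para_end_py : (List (List (String × String))) :=
  [[("type", "text")], [("type", "img")], [("type", "caption_inline")], [("type", "text")], [("type", "sec")]]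

def Spec_move_figures_to_para_end_py (items : List (List (String × String)))
    (out : List (List (String × String))) : Prop := out = move_figures_to_para_end_py_alt items
instance (items : List (List (String × String))) (out : List (List (String × String))) :
    Decidable (Spec_move_figures_to_para_end_py items out) := by
  unfold Spec_move_figures_to_para_end_py; infer_instance

-- ===== CLAIM (what is proved, stated in full; the proofs are below) =====
def Claim_equal_move_figures_to_para_end_py : Prop :=
  ∀ (items : List (List (String × String))), Dom_move_figures_to_para_end_py items →
    Pre_move_figures_to_para_end_py items →
    Spec_move_figures_to_para_end_py items (move_figures_to_para_end_py items)

-- ===== LEMMAS AND PROOFS =====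

-- takeWhile/dropWhile splitting through a weaker predicate
theorem pv_takeWhile_split (p q : List (String × String) → Bool)
    (hpq : ∀ x, p x = true → q x = true) :
    ∀ (l : List (List (String × String))),
      l.takeWhile q = l.takeWhile p ++ (l.dropWhile p).takeWhile q := by
  intro l
  induction l with
  | nil => simp
  | cons x xs ih =>
    by_cases hp : p x = true
    · simp [List.takeWhile_cons, List.dropWhile_cons, hp, hpq x hp, ih]
    · simp [List.dropWhile_cons, hp]

theorem pv_dropWhile_split (p q : List (String × String) → Bool)
    (hpq : ∀ x, p x = true → q x = true) :
    ∀ (l : List (List (String × String))),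
      l.dropWhile q = (l.dropWhile p).dropWhile q := by
  intro l
  induction l with
  | nil => simp
  | cons x xs ih =>
    by_cases hp : p x = true
    · simp [List.dropWhile_cons, hp, hpq x hp, ih]
    · simp [List.dropWhile_cons, hp]

theorem pv_dropWhile_head (p : List (String × String) → Bool) :
    ∀ (l ys : List (List (String × String))) (y : List (String × String)),
      l.dropWhile p = y :: ys → p y = false := by
  intro l
  induction l with
  | nil => intro ys y h; simp at h
  | cons x xs ih =>
    intro ys y h
    by_cases hp : p x = true
    · rw [List.dropWhile_cons_of_pos hp] at h; exact ih ys y h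
    · rw [List.dropWhile_cons_of_neg hp] at h
      cases h; simpa using hp

-- the fig_block A collects flattens to the contiguous fig run, and the remainder is its dropWhile
theorem pvCollectFig_spec : ∀ (l : List (List (String × String))),
    (pvCollectFig l).1.flatten = l.takeWhile (fun y => pvIsFig (pvTy y)) ∧
    (pvCollectFig l).2 = l.dropWhile (fun y => pvIsFig (pvTy y)) := by
  intro l
  have hpq : ∀ x : List (String × String),
      (fun y => pvTy y == "caption_inline") x = true →
      (fun y => pvIsFig (pvTy y)) x = true := by
    intro x hx; simp only [pvIsFig]; simp at hx ⊢; simp [hx]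
  induction l using pvCollectFig.induct with
  | case1 => simp [pvCollectFig]
  | case2 x xs h1 h2 ih =>
    have hsplit1 := pv_takeWhile_split (fun y => pvTy y == "caption_inline")
      (fun y => pvIsFig (pvTy y)) hpq xs
    have hsplit2 := pv_dropWhile_split (fun y => pvTy y == "caption_inline")
      (fun y => pvIsFig (pvTy y)) hpq xs
    simp [pvCollectFig, h1, h2, List.takeWhile_cons, List.dropWhile_cons,
      ih.1, ih.2, ← hsplit1, ← hsplit2]
  | case3 x xs h1 h2 ih =>
    have h2' : (pvTy x == "img") = false := by simpa using h2
    simp [pvCollectFig, h1, h2', List.takeWhile_cons, List.dropWhile_cons, ih.1, ih.2]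
  | case4 x xs h1 =>
    have h1' : pvIsFig (pvTy x) = false := by simpa using h1
    simp [pvCollectFig, h1', List.takeWhile_cons, List.dropWhile_cons]

-- pvPrevAux skips a block of fig items
theorem pvPrevAux_figs (a r : List (List (String × String)))
    (ha : ∀ x ∈ a, pvIsFig (pvTy x) = true) :
    pvPrevAux (a ++ r) = pvPrevAux r := by
  induction a with
  | nil => simp
  | cons x xs ih =>
    simp only [List.cons_append, pvPrevAux, ha x (by simp), if_true]
    exact ih (fun y hy => ha y (by simp [hy]))

-- pvPrevAux is true after a nonempty text run
theorem pvPrevAux_text (a r : List (List (String × String)))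
    (ha : ∀ x ∈ a, pvTy x = "text") (hne : a ≠ []) :
    pvPrevAux (a ++ r) = true := by
  cases a with
  | nil => exact absurd rfl hne
  | cons x xs =>
    have hx : pvTy x = "text" := ha x (by simp)
    simp [pvPrevAux, hx, pvIsFig]

-- A consumes a run of text items one at a time, appending each to result
theorem pvGoA_textrun : ∀ (a : List (List (String × String)))
    (result rest' : List (List (String × String))),
    (∀ x ∈ a, pvTy x = "text") →
    pvGoA result (a ++ rest') = pvGoA (result ++ a) rest' := by
  intro a
  induction a with
  | nil => intro result rest' _; simp
  | cons x xs ih =>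
    intro result rest' h
    have hx : pvTy x = "text" := h x (by simp)
    have hxb : (pvTy x == "img") = false := by simp [hx]
    rw [List.cons_append, pvGoA]
    simp only [hxb, Bool.false_eq_true, not_false_iff, dif_neg]
    rw [ih (result ++ [x]) rest' (fun y hy => h y (by simp [hy]))]
    simp

-- main bridge: A's loop with accumulator = accumulator ++ B's walk, provided the
-- backward scan over the accumulator agrees with the scan over the passed segments
theorem pvMain : ∀ (n : Nat) (rest : List (List (String × String))), rest.length ≤ n →
    ∀ (result : List (List (String × String)))
      (prevRev : List (String × List (List (String × String)))),
      pvPrevAux result.reverse = pvPrevScan prevRev →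
      pvGoA result rest = result ++ pvWalk prevRev (pvSegs rest) := by
  intro n
  induction n with
  | zero =>
    intro rest hlen result prevRev hinv
    have : rest = [] := List.length_eq_zero_iff.mp (Nat.le_zero.mp hlen)
    subst this
    simp [pvGoA, pvSegs, pvWalk]
  | succ n ih =>
    intro rest hlen result prevRev hinv
    match rest with
    | [] => simp [pvGoA, pvSegs, pvWalk]
    | it :: xs =>
      have hxs : xs.length ≤ n := by simp at hlen; omega
      by_cases himg : pvTy it = "img"
      · -- figure block
        have hfig : pvIsFig (pvTy it) = true := by simp [pvIsFig, himg]
        have hspec := pvCollectFig_spec (it :: xs)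
        have e1 : List.takeWhile (fun y => pvIsFig (pvTy y)) (it :: xs) =
            it :: xs.takeWhile (fun y => pvIsFig (pvTy y)) := by
          simp [List.takeWhile_cons, hfig]
        have e2 : List.dropWhile (fun y => pvIsFig (pvTy y)) (it :: xs) =
            xs.dropWhile (fun y => pvIsFig (pvTy y)) := by
          simp [List.dropWhile_cons, hfig]
        rw [e1, e2] at hspec
        have hrunfig : ∀ x ∈ it :: xs.takeWhile (fun y => pvIsFig (pvTy y)),
            pvIsFig (pvTy x) = true := by
          intro x hx
          rcases List.mem_cons.mp hx with h | h
          · subst h; exact hfig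
          · simpa using List.mem_takeWhile_imp (p := fun y => pvIsFig (pvTy y)) h
        have hrest'len : (xs.dropWhile (fun y => pvIsFig (pvTy y))).length ≤ xs.length :=
          List.length_dropWhile_le _ _
        have hsegs : pvSegs (it :: xs) =
            ("fig", it :: xs.takeWhile (fun y => pvIsFig (pvTy y))) ::
              pvSegs (xs.dropWhile (fun y => pvIsFig (pvTy y))) := by
          rw [pvSegs]; simp [himg]
        rcases hrc : xs.dropWhile (fun y => pvIsFig (pvTy y)) with _ | ⟨y, ys⟩
        · -- nothing follows the figure run
          rw [pvGoA]
          simp only [himg, beq_self_eq_true, dif_pos, hspec.1, hspec.2, hrc,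
            Bool.and_false]
          rw [hsegs, hrc, pvWalk.eq_def]
          cases hpv : pvPrevScan prevRev <;>
            simp [pvGoA, pvSegs, pvWalk, hpv]
        · have hyfig : pvIsFig (pvTy y) = false := pv_dropWhile_head _ xs ys y hrc
          have hyimg : ¬ pvTy y = "img" := by
            intro h; rw [h] at hyfig; simp [pvIsFig] at hyfig
          have hycap : ¬ pvTy y = "caption_inline" := by
            intro h; rw [h] at hyfig; simp [pvIsFig] at hyfig
          have hinv' : pvPrevAux ((result ++
              (it :: xs.takeWhile (fun y => pvIsFig (pvTy y)))).reverse) =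
              pvPrevScan (("fig", it :: xs.takeWhile (fun y => pvIsFig (pvTy y))) ::
                prevRev) := by
            rw [List.reverse_append,
              pvPrevAux_figs _ _ (fun x hx => hrunfig x (List.mem_reverse.mp hx))]
            rw [pvPrevScan]; simpa using hinv
          by_cases hyt : pvTy y = "text"
          · -- a text run follows
            have htp : (fun z => pvTy z == "text") y = true := by simp [hyt]
            have hsegs2 : pvSegs (y :: ys) =
                ("text", y :: ys.takeWhile (fun z => pvTy z == "text")) ::
                  pvSegs (ys.dropWhile (fun z => pvTy z == "text")) := by
              rw [pvSegs]; simp [hyimg, hyt]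
            by_cases hprev : pvPrevScan prevRev = true
            · -- swap: text run moves before the figure block
              have hmoved : ∀ x ∈ y :: ys.takeWhile (fun z => pvTy z == "text"),
                  pvTy x = "text" := by
                intro x hx
                rcases List.mem_cons.mp hx with h | h
                · subst h; exact hyt
                · simpa using List.mem_takeWhile_imp (p := fun z => pvTy z == "text") h
              have hlen2 : (ys.dropWhile (fun z => pvTy z == "text")).length ≤ n := by
                have h1 := List.length_dropWhile_le (fun z => pvTy z == "text") ys
                have h2 : (y :: ys).length ≤ xs.length := by
                  rw [← hrc]; exact hrest'len
                simp at h2; omega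
              have hih := ih (ys.dropWhile (fun z => pvTy z == "text")) hlen2
                (result ++ (y :: ys.takeWhile (fun z => pvTy z == "text")) ++
                  (it :: xs.takeWhile (fun y => pvIsFig (pvTy y))))
                (("text", y :: ys.takeWhile (fun z => pvTy z == "text")) ::
                  ("fig", it :: xs.takeWhile (fun y => pvIsFig (pvTy y))) :: prevRev)
                (by
                  rw [List.reverse_append,
                    pvPrevAux_figs _ _ (fun x hx => hrunfig x (List.mem_reverse.mp hx)),
                    List.reverse_append,
                    pvPrevAux_text _ _ (fun x hx => hmoved x (List.mem_reverse.mp hx))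
                      (by simp)]
                  rw [pvPrevScan]; simp)
              have e3 : List.takeWhile (fun z => pvTy z == "text") (y :: ys) =
                  y :: ys.takeWhile (fun z => pvTy z == "text") := by
                simp [List.takeWhile_cons, htp]
              have e4 : List.dropWhile (fun z => pvTy z == "text") (y :: ys) =
                  ys.dropWhile (fun z => pvTy z == "text") := by
                simp [List.dropWhile_cons, htp]
              rw [pvGoA]
              simp only [himg, beq_self_eq_true, dif_pos, hspec.1, hspec.2, hrc]
              rw [hinv, hprev]
              rw [if_pos (show (true && (pvTy y == "text")) = true by simp [hyt])]
              rw [e3, e4, hih]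
              conv_rhs => rw [hsegs, hrc, hsegs2, pvWalk.eq_def]
              simp [hprev, List.append_assoc]
            · -- prev context is not text: no move
              have hprevf : pvPrevScan prevRev = false := by
                cases h : pvPrevScan prevRev
                · rfl
                · exact absurd h hprev
              have hih := ih (y :: ys) (by
                  have h2 : (y :: ys).length ≤ xs.length := by rw [← hrc]; exact hrest'len
                  omega)
                (result ++ (it :: xs.takeWhile (fun y => pvIsFig (pvTy y))))
                (("fig", it :: xs.takeWhile (fun y => pvIsFig (pvTy y))) :: prevRev)
                hinv'
              rw [pvGoA]
              simp only [himg, beq_self_eq_true, dif_pos, hspec.1, hspec.2, hrc]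
              rw [hinv, hprevf]
              rw [if_neg (by simp)]
              rw [hih]
              conv_rhs => rw [hsegs, pvWalk.eq_def]
              simp [hprevf, hrc, List.append_assoc]
          · -- what follows is not text: no move
            have hsegs2 : pvSegs (y :: ys) = ("other", [y]) :: pvSegs ys := by
              rw [pvSegs]; simp [hyimg, hyt, hycap]
            have hytb : (pvTy y == "text") = false := by simp [hyt]
            have hih := ih (y :: ys) (by
                have h2 : (y :: ys).length ≤ xs.length := by rw [← hrc]; exact hrest'len
                omega)
              (result ++ (it :: xs.takeWhile (fun y => pvIsFig (pvTy y))))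
              (("fig", it :: xs.takeWhile (fun y => pvIsFig (pvTy y))) :: prevRev)
              hinv'
            rw [pvGoA]
            simp only [himg, beq_self_eq_true, dif_pos, hspec.1, hspec.2, hrc, hytb,
              Bool.and_false]
            rw [if_neg (by simp)]
            rw [hih]
            conv_rhs => rw [hsegs, hrc, pvWalk.eq_def]
            cases hpv : pvPrevScan prevRev <;>
              simp [hpv, hsegs2, List.append_assoc]
      · by_cases htext : pvTy it = "text"
        · -- text run: A appends it one item at a time, B as one segment
          have htp : (fun z => pvTy z == "text") it = true := by simp [htext]
          have hrun : ∀ x ∈ it :: xs.takeWhile (fun z => pvTy z == "text"),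
              pvTy x = "text" := by
            intro x hx
            rcases List.mem_cons.mp hx with h | h
            · subst h; exact htext
            · simpa using List.mem_takeWhile_imp (p := fun z => pvTy z == "text") h
          have hsplit : it :: xs =
              (it :: xs.takeWhile (fun z => pvTy z == "text")) ++
                xs.dropWhile (fun z => pvTy z == "text") := by
            simp [List.takeWhile_append_dropWhile]
          have hgo := pvGoA_textrun (it :: xs.takeWhile (fun z => pvTy z == "text"))
            result (xs.dropWhile (fun z => pvTy z == "text")) hrun
          have hih := ih (xs.dropWhile (fun z => pvTy z == "text"))
            (le_trans (List.length_dropWhile_le _ _) hxs)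
            (result ++ (it :: xs.takeWhile (fun z => pvTy z == "text")))
            (("text", it :: xs.takeWhile (fun z => pvTy z == "text")) :: prevRev)
            (by
              rw [List.reverse_append,
                pvPrevAux_text _ _ (fun x hx => hrun x (List.mem_reverse.mp hx)) (by simp)]
              rw [pvPrevScan]; simp)
          have hsegs : pvSegs (it :: xs) =
              ("text", it :: xs.takeWhile (fun z => pvTy z == "text")) ::
                pvSegs (xs.dropWhile (fun z => pvTy z == "text")) := by
            rw [pvSegs]; simp [himg, htext]
          calc pvGoA result (it :: xs)
              = pvGoA (result ++ (it :: xs.takeWhile (fun z => pvTy z == "text")))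
                  (xs.dropWhile (fun z => pvTy z == "text")) := by
                  conv_lhs => rw [hsplit]
                  exact hgo
            _ = result ++ pvWalk prevRev (pvSegs (it :: xs)) := by
                  rw [hih]
                  conv_rhs => rw [hsegs, pvWalk.eq_def]
                  simp [List.append_assoc]
        · -- single non-text, non-figure-start item
          have himgb : (pvTy it == "img") = false := by simp [himg]
          have hih := ih xs hxs (result ++ [it])
            ((if pvTy it = "caption_inline" then "cap" else "other", [it]) :: prevRev)
            (by
              by_cases hcap : pvTy it = "caption_inline"
              · simp only [List.reverse_append, List.reverse_singleton,
                  List.singleton_append, pvPrevAux, pvIsFig, hcap]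
                rw [pvPrevScan]; simp [hinv]
              · have hnf : pvIsFig (pvTy it) = false := by
                  simp [pvIsFig, himg, hcap]
                simp only [List.reverse_append, List.reverse_singleton,
                  List.singleton_append, pvPrevAux, hnf, Bool.false_eq_true, if_neg,
                  not_false_iff]
                rw [pvPrevScan]
                simp [hcap, htext])
          rw [pvGoA]
          simp only [himgb, Bool.false_eq_true, not_false_iff, dif_neg]
          rw [hih]
          by_cases hcap : pvTy it = "caption_inline"
          · have hsegs : pvSegs (it :: xs) = ("cap", [it]) :: pvSegs xs := by
              rw [pvSegs]; simp [himg, htext, hcap]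
            conv_rhs => rw [hsegs, pvWalk.eq_def]
            simp [hcap, List.append_assoc]
          · have hsegs : pvSegs (it :: xs) = ("other", [it]) :: pvSegs xs := by
              rw [pvSegs]; simp [himg, htext, hcap]
            conv_rhs => rw [hsegs, pvWalk.eq_def]
            simp [hcap, List.append_assoc]

-- ===== VERDICT (by name: the statement is the Claim_ definition above) =====
theorem move_figures_to_para_end_py_spec : Claim_equal_move_figures_to_para_end_py := by
  intro items _ _
  unfold Spec_move_figures_to_para_end_py move_figures_to_para_end_py
    move_figures_to_para_end_py_alt
  simpa using pvMain items.length items (le_refl _) [] [] rfl
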